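-- pv_equiv track=rewrite | github.com/MaciejDromin/erp | apps/purchase-scanner/src/receipt_scan.py | group_by_extension
-- ===== SOURCE A (Python) =====
-- def group_by_extension(files):
--     ret = {}
--     for f in files:
--         ext = f[f.rfind(".") + 1:].lower()
--         if ext in ret:
--             ret[ext].append(f);
--         else:
--             ret[ext] = [f]
--
--     return ret
-- ===== SOURCE B (Python) =====
-- def group_by_extension(files):
--     pairs = [(f[f.rfind(".") + 1:].lower(), f) for f in files]
--     keys = []
--     for e, _ in pairs:
--         if e not in keys:
--             keys.append(e)
--     return {k: [f for e, f in pairs if e == k] for k in keys}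
-- ===== Notes on version B (the rewrite author's own statement) =====
-- stated objective: alternative
-- what changed: A builds the groups in one pass with a dict keyed by extension; B precomputes (extension, file) pairs, deduplicates the extensions to fix the key order, and builds each group with one filter pass per distinct extension.
import Mathlib
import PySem

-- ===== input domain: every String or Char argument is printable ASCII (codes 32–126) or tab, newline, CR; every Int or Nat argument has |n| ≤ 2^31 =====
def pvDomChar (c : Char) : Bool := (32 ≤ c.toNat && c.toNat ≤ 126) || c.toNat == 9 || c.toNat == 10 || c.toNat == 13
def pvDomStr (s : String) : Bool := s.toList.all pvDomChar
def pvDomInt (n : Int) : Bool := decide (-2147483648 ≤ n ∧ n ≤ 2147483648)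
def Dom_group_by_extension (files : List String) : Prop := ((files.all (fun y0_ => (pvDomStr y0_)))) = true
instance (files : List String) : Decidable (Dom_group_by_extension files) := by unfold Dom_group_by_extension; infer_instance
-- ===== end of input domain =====

-- B replaces A's single-pass dict grouping by precomputed (extension, file) pairs, a deduplicated key list, and one filter per distinct extension (objective: alternative decomposition).

-- shared helper: ext = f[f.rfind(".") + 1:].lower()
def pvExt (f : String) : String :=
  PySem.Str.lower (PySem.Str.slice f (some (PySem.Str.rfind f "." + 1)) none)

-- ===== PORT A =====
def group_by_extension (files : List String) : List (String × List String) :=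
  (files.foldl (fun ret f =>
      let ext := pvExt f
      if ret.contains ext then ret.modify ext [] (fun l => l ++ [f])
      else ret.insert ext [f])
    PySem.Dict.empty).items

-- ===== PORT B =====
def group_by_extension_alt (files : List String) : List (String × List String) :=
  let pairs := files.map (fun f => (pvExt f, f))
  let keys := pairs.foldl (fun ks p => if ks.contains p.1 then ks else ks ++ [p.1]) ([] : List String)
  keys.map (fun k => (k, (pairs.filter (fun p => p.1 == k)).map (fun p => p.2)))

-- ===== PRECONDITION & SPEC =====
def Spec_group_by_extension (files : List String) (out : List (String × List String)) : Prop := out = group_by_extension_alt files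
instance (files : List String) (out : List (String × List String)) : Decidable (Spec_group_by_extension files out) := by unfold Spec_group_by_extension; infer_instance

-- ===== CLAIM (what is proved, stated in full; the proofs are below) =====
def Claim_equal_group_by_extension : Prop := ∀ (files : List String), Dom_group_by_extension files → Spec_group_by_extension files (group_by_extension files)

-- ===== LEMMAS AND PROOFS =====

theorem pv_main (files : List String) :
    group_by_extension files = group_by_extension_alt files := by
  unfold group_by_extension group_by_extension_alt
  dsimp only
  have hstep : (fun (ret : PySem.Dict String (List String)) (f : String) =>
      let ext := pvExt f
      if ret.contains ext then ret.modify ext [] (fun l => l ++ [f])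
      else ret.insert ext [f])
      = fun ret f => ret.modify (pvExt f) [] (fun l => l ++ [f]) := by
    funext ret f
    by_cases h : ret.contains (pvExt f) = true
    · simp [h]
    · simp only [Bool.not_eq_true] at h
      simp [h, PySem.Dict.modify, PySem.Dict.getD_of_not_contains ret ([] : List String) h]
  rw [hstep, ← List.foldl_map
      (f := fun f => (pvExt f, f))
      (g := fun (d : PySem.Dict String (List String)) (p : String × String) =>
        d.modify p.1 [] (fun l => l ++ [p.2]))]
  set pairs := files.map (fun f => (pvExt f, f)) with hp
  have hnd : ((pairs.foldl (fun d p => d.modify p.1 [] (fun l => l ++ [p.2]))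
      PySem.Dict.empty).keys).Nodup :=
    PySem.Dict.nodup_keys_foldl_modify_key pairs Prod.fst [] _ PySem.Dict.empty
      PySem.Dict.nodup_keys_empty
  rw [PySem.Dict.items_eq_map_keys _ hnd []]
  have hkeysA : (pairs.foldl (fun d p => d.modify p.1 [] (fun l => l ++ [p.2]))
      PySem.Dict.empty).keys = PySem.Set.ofList (pairs.map Prod.fst) := by
    rw [PySem.Dict.keys_foldl_modify_key]
    simp [PySem.Set.update_nil_left]
  have hadd : (fun (ks : List String) (p : String × String) =>
      if ks.contains p.1 then ks else ks ++ [p.1])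
      = fun ks p => PySem.Set.add ks p.1 := by
    funext ks p
    simp [PySem.Set.add]
  have hkeysB : pairs.foldl (fun ks p => if ks.contains p.1 then ks else ks ++ [p.1])
      ([] : List String) = PySem.Set.ofList (pairs.map Prod.fst) := by
    rw [hadd, show PySem.Set.ofList (pairs.map Prod.fst)
        = PySem.Set.update [] (pairs.map Prod.fst) from
      (PySem.Set.update_nil_left _).symm, PySem.Set.update_map_eq_foldl_add]
  rw [hkeysA, hkeysB]
  apply List.map_congr_left
  intro k _
  rw [PySem.Dict.getD_foldl_modify_append]
  simp

-- ===== VERDICT (by name: the statement is the Claim_ definition above) =====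
theorem group_by_extension_spec : Claim_equal_group_by_extension := by
  intro files _
  exact pv_main files
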